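-- pv_equiv track=rewrite | github.com/Javiramos276/Algoritmos1Haskell-Python | Practica7.py | pos_secuencia_mas_larga
-- ===== SOURCE A (Python) =====
-- def pos_maximo(s=list[int]) -> bool:
--     if len(s) == 0:
--         return -1
--     else:
--         maximo_valor = s[0]
--         pos_maximo_valor = 0
--         i = 0
--
--         while i < len(s) - 1:
--             if s[i + 1] > maximo_valor:
--                 maximo_valor = s[i + 1]
--                 pos_maximo_valor = i+1
--             i += 1
--
--     return pos_maximo_valor
--
-- def pos_secuencia_mas_larga(numeros: list[int])-> int:
--     lista_contadores: list = []
--     lista_posiciones: list = [0]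
--     contador: int = 0
--
--     for i in range(len(numeros) - 1):
--         if numeros[i] < numeros[i+1]:
--             contador += 1
--         else:
--             lista_contadores.append(contador)
--             lista_posiciones.append(i+1)
--             contador = 0
--
--     lista_contadores.append(contador)
--
--     return lista_posiciones[pos_maximo(lista_contadores)]
-- ===== SOURCE B (Python) =====
-- def pos_secuencia_mas_larga(numeros: list[int]) -> int:
--     cur_len = 0
--     cur_start = 0
--     best_len = -1
--     best_pos = 0
--     for i in range(len(numeros) - 1):
--         if numeros[i] < numeros[i + 1]:
--             cur_len += 1
--         else:
--             if cur_len > best_len: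
--                 best_len = cur_len
--                 best_pos = cur_start
--             cur_start = i + 1
--             cur_len = 0
--     if cur_len > best_len:
--         best_pos = cur_start
--     return best_pos
-- ===== Notes on version B (the rewrite author's own statement) =====
-- stated objective: simpler
-- what changed: Instead of building a run-length table and a run-start table and then scanning the table with a first-maximum helper, B does one pass keeping the current run's length/start and the running best (strict comparison keeps the leftmost longest run), with no intermediate lists and no helper function.
import Mathlib
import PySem

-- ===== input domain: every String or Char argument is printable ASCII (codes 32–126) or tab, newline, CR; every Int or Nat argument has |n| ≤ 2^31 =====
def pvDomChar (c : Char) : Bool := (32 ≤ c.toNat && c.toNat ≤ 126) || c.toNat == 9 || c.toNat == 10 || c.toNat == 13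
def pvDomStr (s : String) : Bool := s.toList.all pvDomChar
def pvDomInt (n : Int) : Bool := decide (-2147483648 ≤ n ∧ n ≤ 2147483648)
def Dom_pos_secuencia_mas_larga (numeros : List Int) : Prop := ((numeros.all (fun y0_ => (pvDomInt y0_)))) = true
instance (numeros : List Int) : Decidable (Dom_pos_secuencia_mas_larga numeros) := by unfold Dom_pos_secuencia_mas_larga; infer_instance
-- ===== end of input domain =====

-- B replaces A's run-length/position tables plus first-maximum table scan by a single pass
-- keeping a running best (simpler: no intermediate lists, no helper function).

-- ===== PORT A =====
-- helper pos_maximo: first index of the maximum (A's while loop as a fold over the index range)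
def pos_maximo (s : List Int) : Int :=
  if s.length = 0 then -1
  else
    ((PySem.List.pyRange 0 ((s.length : Int) - 1) 1).foldl
      (fun (st : Int × Int) i =>
        if PySem.List.pyGetD s (i + 1) 0 > st.1 then (PySem.List.pyGetD s (i + 1) 0, i + 1)
        else st)
      (PySem.List.pyGetD s 0 0, 0)).2

def pos_secuencia_mas_larga (numeros : List Int) : Int :=
  -- state: (lista_contadores, lista_posiciones, contador)
  let fin := (PySem.List.pyRange 0 ((numeros.length : Int) - 1) 1).foldl
    (fun (st : List Int × List Int × Int) i =>
      if PySem.List.pyGetD numeros i 0 < PySem.List.pyGetD numeros (i + 1) 0 then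
        (st.1, st.2.1, st.2.2 + 1)
      else
        (st.1 ++ [st.2.2], st.2.1 ++ [i + 1], 0))
    ([], [0], 0)
  PySem.List.pyGetD fin.2.1 (pos_maximo (fin.1 ++ [fin.2.2])) 0

-- ===== PORT B =====
def pos_secuencia_mas_larga_alt (numeros : List Int) : Int :=
  -- state: (cur_len, cur_start, best_len, best_pos)
  let fin := (PySem.List.pyRange 0 ((numeros.length : Int) - 1) 1).foldl
    (fun (st : Int × Int × Int × Int) i =>
      if PySem.List.pyGetD numeros i 0 < PySem.List.pyGetD numeros (i + 1) 0 then
        (st.1 + 1, st.2.1, st.2.2.1, st.2.2.2)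
      else if st.1 > st.2.2.1 then (0, i + 1, st.1, st.2.1)
      else (0, i + 1, st.2.2.1, st.2.2.2))
    (0, 0, -1, 0)
  if fin.1 > fin.2.2.1 then fin.2.1 else fin.2.2.2

-- ===== PRECONDITION & SPEC =====
def Spec_pos_secuencia_mas_larga (numeros : List Int) (out : Int) : Prop := out = pos_secuencia_mas_larga_alt numeros
instance (numeros : List Int) (out : Int) : Decidable (Spec_pos_secuencia_mas_larga numeros out) := by unfold Spec_pos_secuencia_mas_larga; infer_instance

-- ===== CLAIM (what is proved, stated in full; the proofs are below) =====
def Claim_equal_pos_secuencia_mas_larga : Prop := ∀ (numeros : List Int), Dom_pos_secuencia_mas_larga numeros → Spec_pos_secuencia_mas_larga numeros (pos_secuencia_mas_larga numeros)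

-- ===== LEMMAS AND PROOFS =====

-- "running best" step: keep the pair with the strictly larger first component (first wins ties)
def stepB (st : Int × Int) (x : Int × Int) : Int × Int := if x.1 > st.1 then x else st

theorem getD_of_drop (xs ys : List Int) (k : Nat) (x : Int) (h : xs.drop k = x :: ys) :
    xs.getD k 0 = x := by
  have h0 : (xs.drop k)[0]? = some x := by rw [h]; rfl
  rw [List.getElem?_drop, Nat.add_zero] at h0
  rw [List.getD_eq_getElem?_getD, h0]; rfl

-- Coupling of pos_maximo's index fold (positions looked up in ps afterwards) with the
-- value-level running-best fold over the zipped tails.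
theorem PF (rest : List Int) : ∀ (pt cs ps : List Int) (a : Nat) (m j p : Int),
    cs.drop (a + 1) = rest → ps.drop (a + 1) = pt → pt.length = rest.length →
    PySem.List.pyGetD ps j 0 = p →
    (((PySem.List.pyRange (a : Int) ((a : Int) + rest.length) 1).foldl
        (fun (st : Int × Int) i =>
          if PySem.List.pyGetD cs (i + 1) 0 > st.1 then (PySem.List.pyGetD cs (i + 1) 0, i + 1)
          else st) (m, j)).1
      = ((rest.zip pt).foldl stepB (m, p)).1)
    ∧ PySem.List.pyGetD ps
        (((PySem.List.pyRange (a : Int) ((a : Int) + rest.length) 1).foldl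
          (fun (st : Int × Int) i =>
            if PySem.List.pyGetD cs (i + 1) 0 > st.1 then (PySem.List.pyGetD cs (i + 1) 0, i + 1)
            else st) (m, j)).2) 0
      = ((rest.zip pt).foldl stepB (m, p)).2 := by
  induction rest with
  | nil =>
    intro pt cs ps a m j p hcs hps hlen hjp
    have hpt : pt = [] := List.eq_nil_of_length_eq_zero hlen
    subst hpt
    rw [PySem.List.pyRange_one_eq_nil (by simp)]
    exact ⟨rfl, hjp⟩
  | cons r rest' ih =>
    intro pt cs ps a m j p hcs hps hlen hjp
    cases pt with
    | nil => simp at hlen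
    | cons q pt' =>
      have e1 : ((a : Int) + 1) = ((a + 1 : Nat) : Int) := by push_cast; ring
      have hgc : PySem.List.pyGetD cs (((a + 1 : Nat) : Int)) 0 = r := by
        rw [PySem.List.pyGetD_natCast]
        exact getD_of_drop cs rest' (a + 1) r hcs
      have hgp : PySem.List.pyGetD ps (((a + 1 : Nat) : Int)) 0 = q := by
        rw [PySem.List.pyGetD_natCast]
        exact getD_of_drop ps pt' (a + 1) q hps
      have hcs' : cs.drop (a + 1 + 1) = rest' := by
        have := congrArg List.tail hcs
        simpa [List.tail_drop] using this
      have hps' : ps.drop (a + 1 + 1) = pt' := by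
        have := congrArg List.tail hps
        simpa [List.tail_drop] using this
      have hlen' : pt'.length = rest'.length := by simpa using hlen
      have hcons := PySem.List.pyRange_one_cons (a := (a : Int))
        (b := (a : Int) + ((r :: rest').length : Nat)) (by simp)
      rw [hcons]
      have e2 : ((a : Int) + ((r :: rest').length : Nat)) = ((a + 1 : Nat) : Int) + (rest'.length : Nat) := by
        simp [List.length_cons]; ring
      simp only [List.foldl_cons, List.zip_cons_cons]
      rw [e1, e2, hgc]
      by_cases hgt : r > m
      · simp only [if_pos hgt, stepB]
        exact ih pt' cs ps (a + 1) r (((a + 1 : Nat) : Int)) q hcs' hps' hlen' hgp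
      · simp only [if_neg hgt, stepB]
        exact ih pt' cs ps (a + 1) m j p hcs' hps' hlen' hjp

-- final-scan lemma: indexing ps at pos_maximo cs = running best over the zip
theorem FIN (cs ps : List Int) (h : ps.length = cs.length) (hne : cs ≠ [])
    (hnn : ∀ x ∈ cs, 0 ≤ x) :
    PySem.List.pyGetD ps (pos_maximo cs) 0 = ((cs.zip ps).foldl stepB (-1, 0)).2 := by
  cases cs with
  | nil => exact absurd rfl hne
  | cons c0 crest =>
    cases ps with
    | nil => simp at h
    | cons p0 pt =>
      have hc0 : (0:Int) ≤ c0 := hnn c0 (by simp)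
      have hlen : pt.length = crest.length := by simpa using h
      have hfirst : stepB (-1, 0) (c0, p0) = (c0, p0) := by
        unfold stepB; rw [if_pos (by omega)]
      have hbnd : (((c0 :: crest).length : Int) : Int) - 1 = ((0 : Nat) : Int) + (crest.length : Nat) := by
        simp
      unfold pos_maximo
      rw [if_neg (by simp)]
      have hgc0 : PySem.List.pyGetD (c0 :: crest) 0 0 = c0 := PySem.List.pyGetD_zero_cons c0 crest 0
      have hgp0 : PySem.List.pyGetD (p0 :: pt) 0 0 = p0 := PySem.List.pyGetD_zero_cons p0 pt 0
      rw [List.zip_cons_cons, List.foldl_cons, hfirst, hgc0]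
      have := PF crest pt (c0 :: crest) (p0 :: pt) 0 c0 0 p0 rfl rfl hlen hgp0
      rw [show (((c0 :: crest).length : Int) - 1) = (((0:Nat) : Int) + (crest.length : Nat)) by simp]
      exact this.2

-- main loop coupling invariant
theorem MI (l : List Int) : ∀ (numeros cs ps' : List Int) (c cs0 : Int),
    ps'.length = cs.length → (∀ x ∈ cs, 0 ≤ x) → 0 ≤ c →
    ∃ cs₂ ps₂' c₂ cs0₂,
      (l.foldl
        (fun (st : List Int × List Int × Int) i =>
          if PySem.List.pyGetD numeros i 0 < PySem.List.pyGetD numeros (i + 1) 0 then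
            (st.1, st.2.1, st.2.2 + 1)
          else
            (st.1 ++ [st.2.2], st.2.1 ++ [i + 1], 0))
        (cs, ps' ++ [cs0], c))
        = (cs₂, ps₂' ++ [cs0₂], c₂)
      ∧ (l.foldl
          (fun (st : Int × Int × Int × Int) i =>
            if PySem.List.pyGetD numeros i 0 < PySem.List.pyGetD numeros (i + 1) 0 then
              (st.1 + 1, st.2.1, st.2.2.1, st.2.2.2)
            else if st.1 > st.2.2.1 then (0, i + 1, st.1, st.2.1)
            else (0, i + 1, st.2.2.1, st.2.2.2))
          (c, cs0, ((cs.zip ps').foldl stepB (-1, 0)).1, ((cs.zip ps').foldl stepB (-1, 0)).2))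
        = (c₂, cs0₂, ((cs₂.zip ps₂').foldl stepB (-1, 0)).1, ((cs₂.zip ps₂').foldl stepB (-1, 0)).2)
      ∧ ps₂'.length = cs₂.length ∧ (∀ x ∈ cs₂, 0 ≤ x) ∧ 0 ≤ c₂ := by
  induction l with
  | nil =>
    intro numeros cs ps' c cs0 hlen hnn hc
    exact ⟨cs, ps', c, cs0, rfl, rfl, hlen, hnn, hc⟩
  | cons i l ih =>
    intro numeros cs ps' c cs0 hlen hnn hc
    simp only [List.foldl_cons]
    by_cases hlt : PySem.List.pyGetD numeros i 0 < PySem.List.pyGetD numeros (i + 1) 0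
    · simp only [if_pos hlt]
      exact ih numeros cs ps' (c + 1) cs0 hlen hnn (by omega)
    · simp only [if_neg hlt]
      have hzip : ((cs ++ [c]).zip (ps' ++ [cs0])) = cs.zip ps' ++ [(c, cs0)] := by
        rw [List.zip_append hlen.symm]; rfl
      have hfold : ((cs ++ [c]).zip (ps' ++ [cs0])).foldl stepB (-1, 0)
          = stepB ((cs.zip ps').foldl stepB (-1, 0)) (c, cs0) := by
        rw [hzip, List.foldl_append]; rfl
      have hstep : (if c > ((cs.zip ps').foldl stepB (-1, 0)).1 then
            ((0 : Int), i + 1, c, cs0)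
          else (0, i + 1, ((cs.zip ps').foldl stepB (-1, 0)).1, ((cs.zip ps').foldl stepB (-1, 0)).2))
          = (0, i + 1, ((((cs ++ [c]).zip (ps' ++ [cs0])).foldl stepB (-1, 0)).1),
              (((cs ++ [c]).zip (ps' ++ [cs0])).foldl stepB (-1, 0)).2) := by
        rw [hfold]; unfold stepB; split_ifs <;> rfl
      rw [hstep]
      refine ih numeros (cs ++ [c]) (ps' ++ [cs0]) 0 (i + 1) (by simp [hlen]) ?_ (le_refl 0)
      intro x hx
      rcases List.mem_append.1 hx with h | h
      · exact hnn x h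
      · simp_all

-- ===== VERDICT (by name: the statement is the Claim_ definition above) =====
theorem pos_secuencia_mas_larga_spec : Claim_equal_pos_secuencia_mas_larga := by
  unfold Claim_equal_pos_secuencia_mas_larga
  intro numeros _
  unfold Spec_pos_secuencia_mas_larga
  obtain ⟨cs₂, ps₂', c₂, cs0₂, hA, hB, hlen, hnn, hc⟩ :=
    MI (PySem.List.pyRange 0 ((numeros.length : Int) - 1) 1) numeros [] [] 0 0 rfl (by simp) le_rfl
  unfold pos_secuencia_mas_larga pos_secuencia_mas_larga_alt
  simp only [List.nil_append] at hA
  simp only [List.zip_nil_left, List.foldl_nil] at hB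
  rw [hA, hB]
  have hfin := FIN (cs₂ ++ [c₂]) (ps₂' ++ [cs0₂]) (by simp [hlen]) (by simp)
    (by intro x hx; rcases List.mem_append.1 hx with h | h
        · exact hnn x h
        · simp_all)
  rw [hfin]
  have hzip : ((cs₂ ++ [c₂]).zip (ps₂' ++ [cs0₂])) = cs₂.zip ps₂' ++ [(c₂, cs0₂)] := by
    rw [List.zip_append hlen.symm]; rfl
  rw [hzip, List.foldl_append]
  unfold stepB
  simp only [List.foldl_cons, List.foldl_nil]
  by_cases hgt : c₂ > (List.foldl (fun st x => if x.1 > st.1 then x else st) (-1, 0) (cs₂.zip ps₂')).1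
  · simp [hgt]
  · simp [hgt]
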